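-- pv_equiv track=rewrite | github.com/EinPy/Competition_lib | CodeForces/Practice/Everything/Robots.py | solve
-- ===== SOURCE A (Python) =====
-- def solve(row, col, grid):
--     top, left, fewTotStep = 10, 10, 100
--     steps = []
--     for r in range(row):
--         for c in range(col):
--             if grid[r][c] == 'R':
--                 top = min(top, r)
--                 left = min(left, c)
--                 steps.append((r,c))
--
--     for el in steps:
--         if el[0] <= top and el[1] <= left:
--             return "YES"
--
--     return "NO"
-- ===== SOURCE B (Python) =====
-- def first_col(grid, col, r):
--     # column of the leftmost robot in row r (within the first col cells), or None
--     return next((c for c in range(col) if grid[r][c] == 'R'), None)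
--
--
-- def solve(row, col, grid):
--     # Find the first row (top to bottom) that contains a robot; its leftmost
--     # robot is the candidate top-left robot.  A robot sits at the top-left-most
--     # position iff no later row contains a robot strictly to its left.
--     r0 = next((r for r in range(row) if first_col(grid, col, r) is not None), None)
--     if r0 is None:
--         return "NO"
--     c0 = first_col(grid, col, r0)
--     for r in range(r0 + 1, row):
--         c = first_col(grid, col, r)
--         if c is not None and c < c0:
--             return "NO"
--     return "YES"
-- ===== Notes on version B (the rewrite author's own statement) =====
-- stated objective: alternative
-- what changed: A collects every robot while tracking running minima over the whole grid and then re-scans the collected coordinate list; B never collects anything: it searches for the first row containing a robot, takes that row's leftmost robot (r0, c0) as the candidate top-left robot, and scans only the later rows with an early exit, answering NO as soon as one has a robot strictly left of c0.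
-- intended difference: On grids whose topmost robot row or leftmost robot column exceeds 10 and that do have a robot at that (min row, min col) corner, A returns "NO" because its running minima start at the arbitrary initialiser 10 and get capped, while B returns "YES", the intended answer to 'is a robot at the top-left-most position'. — e.g. on solve(12, 1, [["."], ["."], ["."], ["."], ["."], ["."], ["."], ["."], ["."], ["."], ["."], ["R"]]): A returns "NO", B returns "YES"
import Mathlib
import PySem

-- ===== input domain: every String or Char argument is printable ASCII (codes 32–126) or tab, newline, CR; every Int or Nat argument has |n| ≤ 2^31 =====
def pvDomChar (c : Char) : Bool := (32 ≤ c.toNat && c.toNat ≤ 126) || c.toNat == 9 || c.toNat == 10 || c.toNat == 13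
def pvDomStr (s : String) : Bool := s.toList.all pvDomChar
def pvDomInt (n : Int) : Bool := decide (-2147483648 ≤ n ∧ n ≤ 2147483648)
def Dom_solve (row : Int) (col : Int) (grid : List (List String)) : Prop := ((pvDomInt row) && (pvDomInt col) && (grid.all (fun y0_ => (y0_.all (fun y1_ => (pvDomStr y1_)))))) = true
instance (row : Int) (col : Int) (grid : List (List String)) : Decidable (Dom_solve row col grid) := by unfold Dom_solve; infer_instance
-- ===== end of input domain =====

-- B replaces A's collect-everything strategy (running minima over ALL robots plus a second
-- scan of the collected list) by a first-occurrence search with early exit: find the first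
-- row containing a robot and its leftmost robot (r0, c0), then scan the later rows and
-- answer "NO" as soon as one has a robot strictly left of c0.  B drops A's `10`
-- initialisers, fixing A on grids whose top-left robot lies past row/column 10 (see
-- D_solve).  Equivalence of RETURN values only; neither program mutates its arguments.

-- ===== PORT A =====
-- grid[r][c] == 'R'  (Pre_solve excludes out-of-range indexing, where Python raises);
-- both Pythons spell this very test, so both ports use this helper
def cellA (grid : List (List String)) (r c : Int) : Bool :=
  ((PySem.List.pyGet? grid r).bind (fun g => PySem.List.pyGet? g c)) == some "R"

-- second loop of A: early-return scan over the collected steps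
def solveCheck (top left : Int) : List (Int × Int) → String
  | [] => "NO"
  | el :: rest => if el.1 ≤ top && el.2 ≤ left then "YES" else solveCheck top left rest

def solve (row : Int) (col : Int) (grid : List (List String)) : String :=
  -- top, left, fewTotStep = 10, 10, 100 ; steps = []  (fewTotStep is never used)
  let st := (PySem.List.pyRange 0 row 1).foldl (fun (s : Int × Int × List (Int × Int)) r =>
      (PySem.List.pyRange 0 col 1).foldl (fun (s : Int × Int × List (Int × Int)) c =>
        if cellA grid r c then
          (min s.1 r, min s.2.1 c, s.2.2 ++ [(r, c)])
        else s) s) (10, 10, [])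
  solveCheck st.1 st.2.1 st.2.2

-- ===== PORT B =====
-- first_col(grid, col, r) = next((c for c in range(col) if grid[r][c] == 'R'), None)
def firstColB (grid : List (List String)) (col : Int) (r : Int) : Option Int :=
  (PySem.List.pyRange 0 col 1).find? (fun c => cellA grid r c)

-- the `for r in range(r0+1, row)` loop with its early `return "NO"`
def scanRowsB (grid : List (List String)) (col : Int) (c0 : Int) : List Int → String
  | [] => "YES"
  | r :: rest =>
    match firstColB grid col r with
    | some c => if c < c0 then "NO" else scanRowsB grid col c0 rest
    | none => scanRowsB grid col c0 rest

def solve_alt (row : Int) (col : Int) (grid : List (List String)) : String :=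
  match (PySem.List.pyRange 0 row 1).find? (fun r => (firstColB grid col r).isSome) with
  | none => "NO"
  | some r0 =>
    -- the find? above guarantees firstColB … r0 is some; .getD 0 only unwraps it
    let c0 := (firstColB grid col r0).getD 0
    scanRowsB grid col c0 (PySem.List.pyRange (r0 + 1) row 1)

-- ===== PRECONDITION & SPEC =====
-- Pre_solve excludes exactly the inputs where A raises IndexError: a positive row/col window
-- reaching past the end of grid or past the end of one of the first `row` lines.
def Pre_solve (row : Int) (col : Int) (grid : List (List String)) : Prop :=
  row ≤ 0 ∨ col ≤ 0 ∨ (row ≤ grid.length ∧ ∀ g ∈ grid.take row.toNat, col ≤ g.length)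
instance (row : Int) (col : Int) (grid : List (List String)) : Decidable (Pre_solve row col grid) := by unfold Pre_solve; infer_instance
def pvWitness_solve : Int × Int × List (List String) := (2, 2, [["R", "."], [".", "."]])

-- On grids whose topmost robot row or leftmost robot column exceeds 10 and that do have a
-- robot at that (min row, min col) corner, A returns "NO" (its running minima start at the
-- arbitrary initialiser 10, capping them) while B returns "YES", the intended answer.
-- bnd: how many rows (resp. cells of a row) the window actually reaches.
def bnd (n : Int) (g : List (List String)) : Nat := min g.length n.toNat
def bndc (n : Int) (g : List String) : Nat := min g.length n.toNat

def D_solve (row : Int) (col : Int) (grid : List (List String)) : Prop :=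
  ∃ r < bnd row grid, ∃ c < bndc col (grid[r]?.getD []),
    cellA grid r c ∧ (10 < r ∨ 10 < c) ∧
    ∀ r' < bnd row grid, ∀ c' < bndc col (grid[r']?.getD []),
      cellA grid r' c' → r ≤ r' ∧ c ≤ c'
instance (row : Int) (col : Int) (grid : List (List String)) : Decidable (D_solve row col grid) := by unfold D_solve; infer_instance

def Spec_solve (row : Int) (col : Int) (grid : List (List String)) (out : String) : Prop := ¬ D_solve row col grid → out = solve_alt row col grid
instance (row : Int) (col : Int) (grid : List (List String)) (out : String) : Decidable (Spec_solve row col grid out) := by unfold Spec_solve; infer_instance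

def pvDiffWitness_solve : Int × Int × List (List String) :=
  (12, 1, [["."], ["."], ["."], ["."], ["."], ["."], ["."], ["."], ["."], ["."], ["."], ["R"]])
def pvDiffWitnessOut_solve : String × String := ("NO", "YES")

-- ===== CLAIM (what is proved, stated in full; the proofs are below) =====
def Claim_unchanged_solve : Prop := ∀ (row : Int) (col : Int) (grid : List (List String)), Dom_solve row col grid → Pre_solve row col grid → Spec_solve row col grid (solve row col grid)
def Claim_changed_solve : Prop := Dom_solve (pvDiffWitness_solve.1) (pvDiffWitness_solve.2.1) (pvDiffWitness_solve.2.2) ∧ Pre_solve (pvDiffWitness_solve.1) (pvDiffWitness_solve.2.1) (pvDiffWitness_solve.2.2) ∧ D_solve (pvDiffWitness_solve.1) (pvDiffWitness_solve.2.1) (pvDiffWitness_solve.2.2) ∧ solve (pvDiffWitness_solve.1) (pvDiffWitness_solve.2.1) (pvDiffWitness_solve.2.2) = pvDiffWitnessOut_solve.1 ∧ solve_alt (pvDiffWitness_solve.1) (pvDiffWitness_solve.2.1) (pvDiffWitness_solve.2.2) = pvDiffWitnessOut_solve.2 ∧ pvDiffWitnessOut_solve.1 ≠ pvDiffWitnes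sOut_solve.2
def Claim_exact_solve : Prop := ∀ (row : Int) (col : Int) (grid : List (List String)), Dom_solve row col grid → Pre_solve row col grid → D_solve row col grid → solve row col grid ≠ solve_alt row col grid

-- ===== LEMMAS AND PROOFS =====

-- the robot list of the (row, col) window, row-major (proof-side characterisation of A's steps)
def Rob (row col : Int) (grid : List (List String)) : List (Int × Int) :=
  (PySem.List.pyRange 0 row 1).flatMap (fun r =>
    (PySem.List.pyRange 0 col 1).filterMap (fun c =>
      if cellA grid r c then some (r, c) else none))

theorem foldl_filterMap_if {a b s : Type} (l : List a) (p : a → Prop) [DecidablePred p]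
    (g : a → b) (f : s → b → s) (init : s) :
    l.foldl (fun st x => if p x then f st (g x) else st) init
      = (l.filterMap (fun x => if p x then some (g x) else none)).foldl f init := by
  induction l generalizing init with
  | nil => rfl
  | cons x t ih => by_cases h : p x <;> simp [h, ih]

theorem foldl_upd (l : List (Int × Int)) (st : Int × Int × List (Int × Int)) :
    l.foldl (fun s p => (min s.1 p.1, min s.2.1 p.2, s.2.2 ++ [p])) st
      = ((l.map Prod.fst).foldl min st.1, (l.map Prod.snd).foldl min st.2.1, st.2.2 ++ l) := by
  induction l generalizing st with
  | nil => simp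
  | cons x t ih => simp [ih]

theorem solveCheck_eq (t l : Int) (xs : List (Int × Int)) :
    solveCheck t l xs
      = if xs.any (fun p => decide (p.1 ≤ t) && decide (p.2 ≤ l)) then "YES" else "NO" := by
  induction xs with
  | nil => rfl
  | cons x ys ih =>
      cases h : (decide (x.1 ≤ t) && decide (x.2 ≤ l))
      · unfold solveCheck; rw [List.any_cons, h, Bool.false_or, ih]; simp
      · unfold solveCheck; rw [List.any_cons, h, Bool.true_or]; simp

theorem solve_eq (row col : Int) (grid : List (List String)) :
    solve row col grid =
      if (Rob row col grid).any (fun p =>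
            decide (p.1 ≤ ((Rob row col grid).map Prod.fst).foldl min 10) &&
            decide (p.2 ≤ ((Rob row col grid).map Prod.snd).foldl min 10))
      then "YES" else "NO" := by
  simp only [solve]
  have hcol : ∀ (s : Int × Int × List (Int × Int)) (r : Int),
      (PySem.List.pyRange 0 col 1).foldl (fun s c =>
        if cellA grid r c then
          (min s.1 r, min s.2.1 c, s.2.2 ++ [(r, c)]) else s) s
      = ((PySem.List.pyRange 0 col 1).filterMap (fun c =>
          if cellA grid r c then
            some (r, c) else none)).foldl
          (fun s p => (min s.1 p.1, min s.2.1 p.2, s.2.2 ++ [p])) s := by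
    intro s r
    exact foldl_filterMap_if (PySem.List.pyRange 0 col 1)
      (fun c => cellA grid r c = true)
      (fun c => (r, c)) (fun s p => (min s.1 p.1, min s.2.1 p.2, s.2.2 ++ [p])) s
  simp only [hcol]
  rw [← List.foldl_flatMap]
  unfold Rob
  rw [foldl_upd]
  rw [solveCheck_eq]
  simp

theorem mem_Rob {row col : Int} {grid : List (List String)} {q : Int × Int} :
    q ∈ Rob row col grid ↔
      (0 ≤ q.1 ∧ q.1 < row) ∧ (0 ≤ q.2 ∧ q.2 < col) ∧ cellA grid q.1 q.2 = true := by
  unfold Rob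
  simp only [List.mem_flatMap, List.mem_filterMap, PySem.List.mem_pyRange_one]
  constructor
  · rintro ⟨r, hr, c, hc, hif⟩
    split_ifs at hif with hcell
    · obtain rfl : (r, c) = q := Option.some.inj hif
      exact ⟨hr, hc, hcell⟩
  · rintro ⟨h1, h2, h3⟩
    exact ⟨q.1, h1, q.2, h2, by rw [if_pos h3]⟩

-- foldl-min facts about A's running minima
theorem foldl_min_le_init (l : List Int) (init : Int) : l.foldl min init ≤ init := by
  induction l generalizing init with
  | nil => simp
  | cons x t ih => exact le_trans (ih (min init x)) (min_le_left _ _)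

theorem foldl_min_le_mem {l : List Int} {a : Int} (init : Int) (h : a ∈ l) :
    l.foldl min init ≤ a := by
  induction l generalizing init with
  | nil => cases h
  | cons x t ih =>
    rcases List.mem_cons.mp h with rfl | h'
    · exact le_trans (foldl_min_le_init t (min init a)) (min_le_right _ _)
    · exact ih (min init x) h'

theorem le_foldl_min {l : List Int} {x : Int} (init : Int) (h1 : x ≤ init)
    (h2 : ∀ a ∈ l, x ≤ a) : x ≤ l.foldl min init := by
  induction l generalizing init with
  | nil => exact h1
  | cons a t ih =>
    exact ih (min init a) (le_min h1 (h2 a List.mem_cons_self))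
      (fun b hb => h2 b (List.mem_cons_of_mem a hb))

-- find? over a step-1 range returns the first element satisfying the predicate
theorem find?_pyRange_some {p : Int → Bool} {a b x : Int}
    (h : (PySem.List.pyRange a b 1).find? p = some x) :
    a ≤ x ∧ x < b ∧ p x = true ∧ ∀ y, a ≤ y → y < x → p y = false := by
  by_cases hab : b ≤ a
  · rw [PySem.List.pyRange_one_eq_nil hab] at h; cases h
  · rw [not_le] at hab
    have hsize : ((b - (a+1)).toNat < (b - a).toNat) := by omega
    rw [PySem.List.pyRange_one_cons hab, List.find?_cons] at h
    cases hp : p a with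
    | true =>
      rw [hp] at h
      obtain rfl : a = x := Option.some.inj h
      exact ⟨le_refl _, hab, hp, fun y hy1 hy2 => absurd hy1 (by omega)⟩
    | false =>
      rw [hp] at h
      obtain ⟨h1, h2, h3, h4⟩ := find?_pyRange_some h
      refine ⟨by omega, h2, h3, fun y hy1 hy2 => ?_⟩
      rcases eq_or_lt_of_le hy1 with rfl | hlt
      · exact hp
      · exact h4 y (by omega) hy2
termination_by (b - a).toNat
decreasing_by omega

theorem find?_pyRange_none {p : Int → Bool} {a b : Int}
    (h : (PySem.List.pyRange a b 1).find? p = none) :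
    ∀ y, a ≤ y → y < b → p y = false := by
  intro y hy1 hy2
  have := List.find?_eq_none.mp h y (PySem.List.mem_pyRange_one.mpr ⟨hy1, hy2⟩)
  simpa using this

-- firstColB characterisations in terms of cellA
theorem firstColB_some {grid : List (List String)} {col r c0 : Int}
    (h : firstColB grid col r = some c0) :
    0 ≤ c0 ∧ c0 < col ∧ cellA grid r c0 = true ∧
      ∀ c, 0 ≤ c → c < c0 → cellA grid r c = false :=
  find?_pyRange_some h

theorem firstColB_ne_none {grid : List (List String)} {col r c : Int}
    (h1 : 0 ≤ c) (h2 : c < col) (h3 : cellA grid r c = true) :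
    firstColB grid col r ≠ none := by
  intro hn
  rw [find?_pyRange_none hn c h1 h2] at h3
  cases h3

-- B's second loop as an `any` over the remaining rows
theorem scanRowsB_eq (grid : List (List String)) (col c0 : Int) (l : List Int) :
    scanRowsB grid col c0 l
      = if l.any (fun r => (firstColB grid col r).any (fun c => decide (c < c0)))
        then "NO" else "YES" := by
  induction l with
  | nil => rfl
  | cons r rest ih =>
    unfold scanRowsB
    cases hf : firstColB grid col r with
    | none => rw [ih]; simp [hf]
    | some c =>
      by_cases hc : c < c0
      · simp [hf, hc]
      · rw [ih]; simp [hf, hc]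

theorem cellA_bounds {grid : List (List String)} {r c : Int} (h0r : 0 ≤ r) (h0c : 0 ≤ c)
    (h : cellA grid r c = true) :
    r.toNat < grid.length ∧ c.toNat < (grid[r.toNat]?.getD []).length := by
  unfold cellA at h
  rw [beq_iff_eq] at h
  have h1 := PySem.List.pyGet?_natCast grid r.toNat
  rw [Int.toNat_of_nonneg h0r] at h1
  rw [h1] at h
  cases hg : grid[r.toNat]? with
  | none => rw [hg] at h; simp at h
  | some line =>
    rw [hg, Option.bind_some] at h
    have h2 := PySem.List.pyGet?_natCast line c.toNat
    rw [Int.toNat_of_nonneg h0c] at h2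
    rw [h2] at h
    exact ⟨(List.getElem?_eq_some_iff.mp hg).1,
      by simpa using (List.getElem?_eq_some_iff.mp h).1⟩

theorem D_intro {row col : Int} {grid : List (List String)} {r c : Int}
    (hr : 0 ≤ r ∧ r < row) (hc : 0 ≤ c ∧ c < col) (hcell : cellA grid r c = true)
    (h10 : 10 < r ∨ 10 < c)
    (hmin : ∀ r' c' : Int, 0 ≤ r' → r' < row → 0 ≤ c' → c' < col → cellA grid r' c' = true →
      r ≤ r' ∧ c ≤ c') :
    D_solve row col grid := by
  obtain ⟨hb1, hb2⟩ := cellA_bounds hr.1 hc.1 hcell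
  have hrn := Int.toNat_of_nonneg hr.1
  have hcn := Int.toNat_of_nonneg hc.1
  have hcast : cellA grid (r.toNat : Int) (c.toNat : Int) = true := by
    rw [hrn, hcn]; exact hcell
  refine ⟨r.toNat, by unfold bnd; omega, c.toNat, by unfold bndc; omega, hcast, by omega, ?_⟩
  intro r' hr' c' hc' hcell'
  have h1 : (r' : Int) < row := by unfold bnd at hr'; omega
  have h2 : (c' : Int) < col := by unfold bndc at hc'; omega
  have := hmin r' c' (by positivity) h1 (by positivity) h2 hcell'
  omega

theorem D_elim {row col : Int} {grid : List (List String)} (h : D_solve row col grid) :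
    ∃ r c : Int, (0 ≤ r ∧ r < row) ∧ (0 ≤ c ∧ c < col) ∧ cellA grid r c = true ∧
      (10 < r ∨ 10 < c) ∧
      ∀ r' c' : Int, 0 ≤ r' → r' < row → 0 ≤ c' → c' < col → cellA grid r' c' = true →
        r ≤ r' ∧ c ≤ c' := by
  obtain ⟨r, hr, c, hc, h3, h10, hmin⟩ := h
  have h1 : (r : Int) < row := by unfold bnd at hr; omega
  have h2 : (c : Int) < col := by unfold bndc at hc; omega
  refine ⟨(r : Int), (c : Int), ⟨by positivity, h1⟩, ⟨by positivity, h2⟩, h3, by omega, ?_⟩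
  intro r' c' h0r hrr h0c hcc hcell'
  obtain ⟨hb1, hb2⟩ := cellA_bounds h0r h0c hcell'
  have hrn := Int.toNat_of_nonneg h0r
  have hcn := Int.toNat_of_nonneg h0c
  have hcast : cellA grid (r'.toNat : Int) (c'.toNat : Int) = true := by
    rw [hrn, hcn]; exact hcell'
  have := hmin r'.toNat (by unfold bnd; omega) c'.toNat (by unfold bndc; omega) hcast
  omega

-- ===== VERDICT (by name: the statement is the Claim_ definition above) =====
theorem solve_spec : Claim_unchanged_solve := by
  intro row col grid hdom hpre hnd
  show solve row col grid = solve_alt row col grid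
  rw [solve_eq]
  unfold solve_alt
  cases hf : (PySem.List.pyRange 0 row 1).find? (fun r => (firstColB grid col r).isSome) with
  | none =>
    -- no row contains a robot: Rob is empty, both answer "NO"
    have hRnil : Rob row col grid = [] := by
      rw [List.eq_nil_iff_forall_not_mem]
      intro q hq
      obtain ⟨hr, hc, hcell⟩ := mem_Rob.mp hq
      have := find?_pyRange_none hf q.1 hr.1 hr.2
      exact firstColB_ne_none hc.1 hc.2 hcell (by simpa using this)
    rw [hRnil]
    simp
  | some r0 =>
    obtain ⟨hr00, hr0row, hr0some, hr0first⟩ := find?_pyRange_some hf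
    cases hc0 : firstColB grid col r0 with
    | none => rw [hc0] at hr0some; cases hr0some
    | some c0 =>
      simp only [hc0, Option.getD_some]
      obtain ⟨hc00, hc0col, hcell0, hc0first⟩ := firstColB_some hc0
      -- F1: (r0, c0) ∈ Rob
      have hF1 : (r0, c0) ∈ Rob row col grid := mem_Rob.mpr ⟨⟨hr00, hr0row⟩, ⟨hc00, hc0col⟩, hcell0⟩
      -- F2: every robot lies in row ≥ r0
      have hF2 : ∀ q ∈ Rob row col grid, r0 ≤ q.1 := by
        intro q hq
        obtain ⟨hr, hc, hcell⟩ := mem_Rob.mp hq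
        by_contra hlt
        have hnone := hr0first q.1 hr.1 (by omega)
        exact firstColB_ne_none hc.1 hc.2 hcell (by simpa using hnone)
      -- F3: a robot in row r0 lies in column ≥ c0
      have hF3 : ∀ q ∈ Rob row col grid, q.1 = r0 → c0 ≤ q.2 := by
        intro q hq hq1
        obtain ⟨hr, hc, hcell⟩ := mem_Rob.mp hq
        by_contra hlt
        rw [hq1] at hcell
        rw [hc0first q.2 hc.1 (by omega)] at hcell
        cases hcell
      rw [scanRowsB_eq]
      cases hscan : (PySem.List.pyRange (r0 + 1) row 1).any
          (fun r => (firstColB grid col r).any (fun c => decide (c < c0))) with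
      | true =>
        -- some later row has a robot strictly left of c0: corner robot cannot exist
        obtain ⟨r1, hr1mem, hany1⟩ := List.any_eq_true.mp hscan
        obtain ⟨hr1lo, hr1hi⟩ := PySem.List.mem_pyRange_one.mp hr1mem
        cases hc1 : firstColB grid col r1 with
        | none => rw [hc1] at hany1; cases hany1
        | some c1 =>
          rw [hc1] at hany1
          have hc1lt : c1 < c0 := by simpa using hany1
          obtain ⟨hc10, hc1col, hcell1, _⟩ := firstColB_some hc1
          have hq1 : (r1, c1) ∈ Rob row col grid :=
            mem_Rob.mpr ⟨⟨by omega, hr1hi⟩, ⟨hc10, hc1col⟩, hcell1⟩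
          have hnoq : (Rob row col grid).any (fun p =>
              decide (p.1 ≤ ((Rob row col grid).map Prod.fst).foldl min 10) &&
              decide (p.2 ≤ ((Rob row col grid).map Prod.snd).foldl min 10)) = false := by
            rw [List.any_eq_false]
            intro q hq hdec
            simp only [Bool.and_eq_true, decide_eq_true_eq] at hdec
            have hT := foldl_min_le_mem (l := (Rob row col grid).map Prod.fst) 10
              (List.mem_map_of_mem hq)
            have hL := foldl_min_le_mem (l := (Rob row col grid).map Prod.snd) 10
              (List.mem_map_of_mem hq1)
            -- q.1 = min row = r0, yet q.2 ≤ L ≤ c1 < c0 contradicts firstness in row r0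
            have hq1row := hF2 q hq
            have hT0 := foldl_min_le_mem (l := (Rob row col grid).map Prod.fst) 10
              (List.mem_map_of_mem hF1)
            have hqr0 : q.1 = r0 := by omega
            have := hF3 q hq hqr0
            omega
          rw [hnoq]
          simp
      | false =>
        -- B answers "YES": (r0, c0) is the corner robot; without D_ its coords are ≤ 10
        -- G: every robot lies in column ≥ c0
        have hG : ∀ q ∈ Rob row col grid, c0 ≤ q.2 := by
          intro q hq
          obtain ⟨hr, hc, hcell⟩ := mem_Rob.mp hq
          rcases eq_or_lt_of_le (hF2 q hq) with heq | hlt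
          · exact hF3 q hq heq.symm
          · cases hcq : firstColB grid col q.1 with
            | none => exact absurd hcq (firstColB_ne_none hc.1 hc.2 hcell)
            | some cq =>
              obtain ⟨hcq0, hcqcol, hcqcell, hcqfirst⟩ := firstColB_some hcq
              have hmemr : q.1 ∈ PySem.List.pyRange (r0 + 1) row 1 :=
                PySem.List.mem_pyRange_one.mpr ⟨by omega, hr.2⟩
              have := List.any_eq_false.mp (by simpa using hscan) q.1 hmemr
              rw [hcq] at this
              have hcqge : c0 ≤ cq := by simpa using this
              -- cq is the first robot column of row q.1, so cq ≤ q.2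
              by_contra hqlt
              have : c0 ≤ q.2 := by
                have hqcq : ¬ (q.2 < cq) := by
                  intro hww
                  rw [hcqfirst q.2 hc.1 hww] at hcell
                  cases hcell
                omega
              exact hqlt this
        -- ¬ D_solve forces r0 ≤ 10 and c0 ≤ 10
        have h10 : r0 ≤ 10 ∧ c0 ≤ 10 := by
          by_contra hcon
          apply hnd
          refine D_intro ⟨hr00, hr0row⟩ ⟨hc00, hc0col⟩ hcell0 (by omega) ?_
          intro r' c' h0r hrr h0c hcc hcell'
          have hmem' : (r', c') ∈ Rob row col grid :=
            mem_Rob.mpr ⟨⟨h0r, hrr⟩, ⟨h0c, hcc⟩, hcell'⟩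
          exact ⟨hF2 _ hmem', hG _ hmem'⟩
        -- (r0, c0) passes A's capped-minimum test
        have hT : r0 ≤ ((Rob row col grid).map Prod.fst).foldl min 10 :=
          le_foldl_min 10 (by omega) (by
            intro a ha
            obtain ⟨q, hq, rfl⟩ := List.mem_map.mp ha
            exact hF2 q hq)
        have hL : c0 ≤ ((Rob row col grid).map Prod.snd).foldl min 10 :=
          le_foldl_min 10 (by omega) (by
            intro a ha
            obtain ⟨q, hq, rfl⟩ := List.mem_map.mp ha
            exact hG q hq)
        have hany : (Rob row col grid).any (fun p =>
            decide (p.1 ≤ ((Rob row col grid).map Prod.fst).foldl min 10) &&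
            decide (p.2 ≤ ((Rob row col grid).map Prod.snd).foldl min 10)) = true :=
          List.any_eq_true.mpr ⟨(r0, c0), hF1, by simp; omega⟩
        rw [hany]
        simp

theorem solve_tight : Claim_exact_solve := by
  intro row col grid hdom hpre hD
  obtain ⟨r, c, hrb, hcb, hcell, h10, hminp⟩ := D_elim hD
  have hRmem : (r, c) ∈ Rob row col grid := mem_Rob.mpr ⟨hrb, hcb, hcell⟩
  -- A answers "NO": the capped minima are ≤ 10, below every robot coordinate
  rw [solve_eq]
  have hnoq : (Rob row col grid).any (fun p =>
      decide (p.1 ≤ ((Rob row col grid).map Prod.fst).foldl min 10) &&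
      decide (p.2 ≤ ((Rob row col grid).map Prod.snd).foldl min 10)) = false := by
    rw [List.any_eq_false]
    intro q hq hdec
    simp only [Bool.and_eq_true, decide_eq_true_eq] at hdec
    obtain ⟨hr, hc, _⟩ := mem_Rob.mp hq
    have hT := foldl_min_le_init ((Rob row col grid).map Prod.fst) 10
    have hL := foldl_min_le_init ((Rob row col grid).map Prod.snd) 10
    have := hminp q.1 q.2 hr.1 hr.2 hc.1 hc.2 (mem_Rob.mp hq).2.2
    omega
  rw [hnoq]
  -- B answers "YES": the first robot found is (r, c) itself, and nothing lies left of it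
  unfold solve_alt
  cases hf : (PySem.List.pyRange 0 row 1).find? (fun r => (firstColB grid col r).isSome) with
  | none =>
    have := find?_pyRange_none hf r hrb.1 hrb.2
    exact absurd this (by
      intro hn
      exact firstColB_ne_none hcb.1 hcb.2 hcell (by simpa using hn))
  | some r0 =>
    obtain ⟨hr00, hr0row, hr0some, hr0first⟩ := find?_pyRange_some hf
    cases hc0 : firstColB grid col r0 with
    | none => rw [hc0] at hr0some; cases hr0some
    | some c0 =>
      simp only [hc0, Option.getD_some]
      obtain ⟨hc00, hc0col, hcell0, hc0first⟩ := firstColB_some hc0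
      -- r0 = r and c0 = c
      have hr0r : r0 = r := by
        have h1 : r ≤ r0 := (hminp r0 c0 hr00 hr0row hc00 hc0col hcell0).1
        by_contra hne
        have hlt : r < r0 := by omega
        have := hr0first r hrb.1 hlt
        exact firstColB_ne_none hcb.1 hcb.2 hcell (by simpa using this)
      have hc0c : c0 = c := by
        have h1 : c ≤ c0 := (hminp r0 c0 hr00 hr0row hc00 hc0col hcell0).2
        by_contra hne
        have hlt : c < c0 := by omega
        subst hr0r
        rw [hc0first c hcb.1 hlt] at hcell
        cases hcell
      rw [scanRowsB_eq]
      have hscan : (PySem.List.pyRange (r0 + 1) row 1).any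
          (fun r1 => (firstColB grid col r1).any (fun c1 => decide (c1 < c0))) = false := by
        rw [List.any_eq_false]
        intro r1 hr1 hany1
        obtain ⟨hr1lo, hr1hi⟩ := PySem.List.mem_pyRange_one.mp hr1
        cases hc1 : firstColB grid col r1 with
        | none => rw [hc1] at hany1; cases hany1
        | some c1 =>
          rw [hc1] at hany1
          obtain ⟨hc10, hc1col, hcell1, _⟩ := firstColB_some hc1
          have := (hminp r1 c1 (by omega) hr1hi hc10 hc1col hcell1).2
          have hlt : c1 < c0 := by simpa using hany1
          omega
      rw [hscan]
      simp

theorem solve_changed : Claim_changed_solve := by unfold Claim_changed_solve; decide
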